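-- pv_equiv track=rewrite | github.com/Midhilesh4890/Leetcode-Problems | cards.py | is_valid_card_set
-- ===== SOURCE A (Python) =====
-- def is_valid_card_set(cards):
--     if len(cards) < 3:
--         return False  # Needs at least 3 cards
--
--     # Mapping ranks to numerical values
--     rank_values = {'A': 1, 'J': 11, 'Q': 12, 'K': 13}
--     rank_values.update({str(i): i for i in range(2, 11)})  # Adding 2-10
--
--     # Extract ranks and suits from cards
--     ranks = [card[:-1] for card in cards]  # Remove last character (suit)
--     suits = [card[-1] for card in cards]   # Get last character (suit)
--
--     # Check for Criterion 1: All cards have the same rank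
--     if len(set(ranks)) == 1:
--         return True
--
--     # Check for Criterion 2: All cards have the same suit and consecutive ranks
--     if len(set(suits)) == 1:  # All suits are same
--         rank_nums = sorted(rank_values[r] for r in ranks)  # Convert ranks to numbers and sort
--         if all(rank_nums[i] + 1 == rank_nums[i + 1] for i in range(len(rank_nums) - 1)):
--             return True
--
--     return False  # Doesn't satisfy any criterion
-- ===== SOURCE B (Python) =====
-- def is_valid_card_set(cards):
--     if len(cards) < 3:
--         return False
--     ranks = [card[:-1] for card in cards]
--     # Criterion 1: all ranks equal (compare against the first, no set needed)
--     if all(r == ranks[0] for r in ranks):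
--         return True
--     # Criterion 2: all same suit and the ranks form a consecutive run.
--     if any(card[-1] != cards[0][-1] for card in cards):
--         return False
--     rank_values = {'A': 1, '2': 2, '3': 3, '4': 4, '5': 5, '6': 6,
--                    '7': 7, '8': 8, '9': 9, '10': 10, 'J': 11, 'Q': 12, 'K': 13}
--     nums = [rank_values[r] for r in ranks]
--     # consecutive <=> pairwise distinct and a tight min..max range, no sort needed
--     return len(set(nums)) == len(nums) and max(nums) - min(nums) + 1 == len(nums)
-- ===== Notes on version B (the rewrite author's own statement) =====
-- stated objective: faster
-- what changed: Criterion 1 compares every rank to the first instead of building a set; criterion 2 replaces sort-then-adjacent-scan with the no-sort check 'all values distinct and max-min+1 == n'; the rank map is a plain literal dict instead of literal+update loop.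
import Mathlib
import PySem

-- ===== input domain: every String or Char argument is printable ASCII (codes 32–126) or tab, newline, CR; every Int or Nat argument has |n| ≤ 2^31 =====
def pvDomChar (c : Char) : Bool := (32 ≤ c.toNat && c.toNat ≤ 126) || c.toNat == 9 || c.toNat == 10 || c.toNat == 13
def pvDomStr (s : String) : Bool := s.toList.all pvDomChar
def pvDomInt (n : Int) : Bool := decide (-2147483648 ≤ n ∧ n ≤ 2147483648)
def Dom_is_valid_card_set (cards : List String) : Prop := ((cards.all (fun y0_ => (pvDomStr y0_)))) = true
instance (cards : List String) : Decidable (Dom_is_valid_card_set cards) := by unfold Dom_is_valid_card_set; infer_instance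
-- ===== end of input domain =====

-- B replaces A's set-based all-equal tests by compare-to-first scans and A's sort-then-adjacent-scan
-- consecutiveness test by a no-sort "all distinct and max-min+1 = n" check (objective: faster, measured).


-- shared little helpers: card[:-1] and card[-1] (default only hit where Python raises, outside Pre_)
def pvRank (c : String) : String := PySem.Str.slice c none (some (-1))
def pvSuit (c : String) : Char := (PySem.Str.pyGet? c (-1)).getD ' '

-- ===== PORT A =====
-- rank_values = {'A':1,'J':11,'Q':12,'K':13}; rank_values.update({str(i): i for i in range(2, 11)})
def pvRankValues : PySem.Dict String Int :=
  (PySem.List.pyRange 2 11 1).foldl (fun d i => d.insert (PySem.Int.toStr i) i)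
    (PySem.Dict.ofList [("A", 1), ("J", 11), ("Q", 12), ("K", 13)])

def is_valid_card_set (cards : List String) : Bool :=
  if cards.length < 3 then false
  else
    let ranks := cards.map pvRank
    let suits := cards.map pvSuit
    if (PySem.Set.ofList ranks).length == 1 then true
    else if (PySem.Set.ofList suits).length == 1 then
      let rank_nums := PySem.List.sorted (ranks.map (fun r => (pvRankValues.get? r).getD 0)) (fun x => x) false
      if (List.range (rank_nums.length - 1)).all (fun i => rank_nums.getD i 0 + 1 == rank_nums.getD (i + 1) 0) then true
      else false
    else false

-- ===== PORT B =====
def pvRankValuesAlt : PySem.Dict String Int :=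
  PySem.Dict.ofList [("A", 1), ("2", 2), ("3", 3), ("4", 4), ("5", 5), ("6", 6),
                     ("7", 7), ("8", 8), ("9", 9), ("10", 10), ("J", 11), ("Q", 12), ("K", 13)]

def is_valid_card_set_alt (cards : List String) : Bool :=
  if cards.length < 3 then false
  else
    let ranks := cards.map pvRank
    if ranks.all (fun r => r == ranks.getD 0 "") then true
    else if cards.any (fun c => pvSuit c != pvSuit (cards.getD 0 "")) then false
    else
      let nums := ranks.map (fun r => (pvRankValuesAlt.get? r).getD 0)
      ((PySem.Set.ofList nums).length == nums.length)
        && ((PySem.List.max? nums (fun x => x)).getD 0 - (PySem.List.min? nums (fun x => x)).getD 0 + 1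
              == (nums.length : Int))

-- ===== PRECONDITION & SPEC =====
def pvValidRank (r : String) : Bool :=
  r ∈ ["A", "2", "3", "4", "5", "6", "7", "8", "9", "10", "J", "Q", "K"]

-- Pre_ excludes exactly the inputs where Python A raises: with ≥ 3 cards, an empty-string card
-- (IndexError on card[-1]) or — when the ranks are not all equal but the suits all are — a rank
-- outside the 13 valid ones (KeyError in rank_values[r]).
def Pre_is_valid_card_set (cards : List String) : Prop :=
  cards.length < 3 ∨
    ("" ∉ cards ∧
      ((∀ c ∈ cards, pvRank c = pvRank (cards.getD 0 "")) ∨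
       (¬ ∀ c ∈ cards, pvSuit c = pvSuit (cards.getD 0 "")) ∨
       (∀ c ∈ cards, pvValidRank (pvRank c) = true)))
instance (cards : List String) : Decidable (Pre_is_valid_card_set cards) := by
  unfold Pre_is_valid_card_set; infer_instance

def pvWitness_is_valid_card_set : List String := ["2H", "3H", "4H"]

def Spec_is_valid_card_set (cards : List String) (out : Bool) : Prop := out = is_valid_card_set_alt cards
instance (cards : List String) (out : Bool) : Decidable (Spec_is_valid_card_set cards out) := by unfold Spec_is_valid_card_set; infer_instance

-- ===== CLAIM (what is proved, stated in full; the proofs are below) =====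
def Claim_equal_is_valid_card_set : Prop := ∀ (cards : List String), Dom_is_valid_card_set cards → Pre_is_valid_card_set cards → Spec_is_valid_card_set cards (is_valid_card_set cards)

-- ===== LEMMAS AND PROOFS =====

set_option maxHeartbeats 2000000 in
lemma rankValues_eq : pvRankValues = PySem.Dict.mk
    [("A",1),("J",11),("Q",12),("K",13),("2",2),("3",3),("4",4),("5",5),("6",6),("7",7),("8",8),("9",9),("10",10)] := by
  rfl

set_option maxHeartbeats 2000000 in
lemma rankValuesAlt_eq : pvRankValuesAlt = PySem.Dict.mk
    [("A",1),("2",2),("3",3),("4",4),("5",5),("6",6),("7",7),("8",8),("9",9),("10",10),("J",11),("Q",12),("K",13)] := by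
  rfl

set_option maxHeartbeats 2000000 in
lemma rankValues_get?_eq (r : String) : pvRankValues.get? r = pvRankValuesAlt.get? r := by
  rw [rankValues_eq, rankValuesAlt_eq]
  by_cases h1 : ("A":String) = r; · subst h1; rfl
  by_cases h2 : ("2":String) = r; · subst h2; rfl
  by_cases h3 : ("3":String) = r; · subst h3; rfl
  by_cases h4 : ("4":String) = r; · subst h4; rfl
  by_cases h5 : ("5":String) = r; · subst h5; rfl
  by_cases h6 : ("6":String) = r; · subst h6; rfl
  by_cases h7 : ("7":String) = r; · subst h7; rfl
  by_cases h8 : ("8":String) = r; · subst h8; rfl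
  by_cases h9 : ("9":String) = r; · subst h9; rfl
  by_cases h10 : ("10":String) = r; · subst h10; rfl
  by_cases h11 : ("J":String) = r; · subst h11; rfl
  by_cases h12 : ("Q":String) = r; · subst h12; rfl
  by_cases h13 : ("K":String) = r; · subst h13; rfl
  simp only [PySem.Dict.get?_mk_cons, beq_iff_eq, if_neg h1, if_neg h2, if_neg h3, if_neg h4,
    if_neg h5, if_neg h6, if_neg h7, if_neg h8, if_neg h9, if_neg h10, if_neg h11, if_neg h12, if_neg h13]

lemma setLen_one_iff {α : Type} [DecidableEq α] (l : List α) (d : α) (hl : l ≠ []) :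
    (PySem.Set.ofList l).length = 1 ↔ ∀ x ∈ l, x = l.getD 0 d := by
  rcases l with _ | ⟨a, t⟩
  · exact absurd rfl hl
  constructor
  · intro h x hx
    rcases List.length_eq_one_iff.1 h with ⟨y, hy⟩
    have hax : a ∈ PySem.Set.ofList (a :: t) := (PySem.Set.mem_ofList _ _).2 (by simp)
    have hxx : x ∈ PySem.Set.ofList (a :: t) := (PySem.Set.mem_ofList _ _).2 hx
    rw [hy] at hax hxx
    simp at hax hxx
    simp [hxx, hax]
  · intro h
    have hmem : ∀ x, x ∈ PySem.Set.ofList (a :: t) ↔ x ∈ ({a} : Finset α) := by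
      intro x
      rw [PySem.Set.mem_ofList, Finset.mem_singleton]
      constructor
      · intro hx; simpa using h x hx
      · intro hx; simp [hx]
    have : (PySem.Set.ofList (a :: t)).toFinset = {a} := by
      ext x; rw [List.mem_toFinset]; exact hmem x
    have hc := List.toFinset_card_of_nodup (PySem.Set.nodup_ofList (xs := a :: t))
    rw [this] at hc
    simp at hc; omega

lemma setLen_eq_iff_nodup {α : Type} [DecidableEq α] (l : List α) :
    (PySem.Set.ofList l).length = l.length ↔ l.Nodup := by
  constructor
  · intro h
    have hsub : (PySem.Set.ofList l).toFinset = l.toFinset := by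
      ext x; simp [List.mem_toFinset, PySem.Set.mem_ofList]
    have h1 : (PySem.Set.ofList l).toFinset.card = (PySem.Set.ofList l).length :=
      List.toFinset_card_of_nodup (PySem.Set.nodup_ofList (xs := l))
    have h2 : l.toFinset.card = l.dedup.length := List.card_toFinset l
    rw [hsub, h2] at h1
    have h3 : l.dedup = l := (List.dedup_sublist l).eq_of_length (by omega)
    rw [← h3]; exact List.nodup_dedup l
  · intro h; rw [PySem.Set.ofList_eq_self_of_nodup (xs := l) h]

lemma chain_ap (s : List Int) (hs : ∀ i, i + 1 < s.length → s.getD i 0 + 1 = s.getD (i+1) 0) :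
    ∀ i, i < s.length → s.getD i 0 = s.getD 0 0 + i := by
  intro i
  induction i with
  | zero => intro _; simp
  | succ k ih =>
    intro h
    have h1 := ih (by omega)
    have h2 := hs k (by omega)
    push_cast
    omega

-- strictly increasing (mono + nodup) implies gap bound

lemma strict_gap (s : List Int) (hmono : s.Pairwise (· ≤ ·)) (hnd : s.Nodup) :
    ∀ k i, i + k < s.length → s.getD i 0 + k ≤ s.getD (i+k) 0 := by
  intro k
  induction k with
  | zero => intro i h; simp
  | succ m ih =>
    intro i h
    have h1 := ih i (by omega)
    have hlt : s.getD (i+m) 0 < s.getD (i+m+1) 0 := by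
      have hle : s[i+m]'(by omega) ≤ s[i+m+1]'(by omega) :=
        (List.pairwise_iff_getElem.1 hmono) (i+m) (i+m+1) (by omega) (by omega) (by omega)
      have hne : s[i+m]'(by omega) ≠ s[i+m+1]'(by omega) := by
        intro he
        have := (List.Nodup.getElem_inj_iff hnd).1 he
        omega
      rw [List.getD_eq_getElem s 0 (by omega), List.getD_eq_getElem s 0 (by omega)]
      omega
    push_cast
    push_cast at h1
    have : i + (m+1) = i + m + 1 := by omega
    rw [this]
    omega
-- max over nums is the last element of sorted(nums), min the first

lemma max_eq_last (nums : List Int) (h : nums ≠ []) :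
    (PySem.List.max? nums (fun x => x)).getD 0
      = (PySem.List.sorted nums (fun x => x) false).getD ((PySem.List.sorted nums (fun x => x) false).length - 1) 0 := by
  set s := PySem.List.sorted nums (fun x => x) false with hsdef
  have hperm : s.Perm nums := PySem.List.sorted_perm nums (fun x => x) false
  have hlen : s.length = nums.length := hperm.length_eq
  have hn : 0 < nums.length := List.length_pos_iff.2 h
  obtain ⟨M, hM⟩ : ∃ M, PySem.List.max? nums (fun x => x) = some M := by
    cases hM : PySem.List.max? nums (fun x => x) with
    | none => exact absurd ((PySem.List.max?_eq_none_iff _ _).1 hM) h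
    | some M => exact ⟨M, rfl⟩
  have hmax := PySem.List.max?_isMax hM
  have hmem : M ∈ s := hperm.mem_iff.2 (PySem.List.max?_mem hM)
  obtain ⟨p, hp, hpe⟩ := List.mem_iff_getElem.1 hmem
  have h1 : M ≤ s[s.length - 1]'(by omega) := by
    rw [← hpe]; exact PySem.List.sorted_id_getElem_mono nums (by omega) (by rw [← hsdef]; omega)
  have h2 : s[s.length - 1]'(by omega) ≤ M :=
    hmax _ (hperm.mem_iff.1 (List.getElem_mem _))
  rw [hM, List.getD_eq_getElem s 0 (by omega)]
  simp only [Option.getD_some]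
  omega

lemma min_eq_head (nums : List Int) (h : nums ≠ []) :
    (PySem.List.min? nums (fun x => x)).getD 0
      = (PySem.List.sorted nums (fun x => x) false).getD 0 0 := by
  set s := PySem.List.sorted nums (fun x => x) false with hsdef
  have hperm : s.Perm nums := PySem.List.sorted_perm nums (fun x => x) false
  have hlen : s.length = nums.length := hperm.length_eq
  have hn : 0 < nums.length := List.length_pos_iff.2 h
  obtain ⟨m, hm⟩ : ∃ m, PySem.List.min? nums (fun x => x) = some m := by
    cases hm : PySem.List.min? nums (fun x => x) with
    | none => exact absurd ((PySem.List.min?_eq_none_iff _ _).1 hm) h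
    | some m => exact ⟨m, rfl⟩
  have hmin := PySem.List.min?_isMin hm
  have hmem : m ∈ s := hperm.mem_iff.2 (PySem.List.min?_mem hm)
  obtain ⟨p, hp, hpe⟩ := List.mem_iff_getElem.1 hmem
  have h1 : s[0]'(by omega) ≤ m := by
    rw [← hpe]; exact PySem.List.sorted_id_getElem_mono nums (by omega) (by rw [← hsdef]; omega)
  have h2 : m ≤ s[0]'(by omega) :=
    hmin _ (hperm.mem_iff.1 (List.getElem_mem _))
  rw [hm, List.getD_eq_getElem s 0 (by omega)]
  simp only [Option.getD_some]
  omega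

lemma core_consec (nums : List Int) (h : nums ≠ []) :
    (List.range ((PySem.List.sorted nums (fun x => x) false).length - 1)).all
        (fun i => (PySem.List.sorted nums (fun x => x) false).getD i 0 + 1
                    == (PySem.List.sorted nums (fun x => x) false).getD (i + 1) 0)
      = (((PySem.Set.ofList nums).length == nums.length)
         && ((PySem.List.max? nums (fun x => x)).getD 0 - (PySem.List.min? nums (fun x => x)).getD 0 + 1
               == (nums.length : Int))) := by
  set s := PySem.List.sorted nums (fun x => x) false with hsdef
  have hperm : s.Perm nums := PySem.List.sorted_perm nums (fun x => x) false
  have hlen : s.length = nums.length := hperm.length_eq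
  have hn : 0 < nums.length := List.length_pos_iff.2 h
  have hpw : s.Pairwise (· ≤ ·) := by
    have := PySem.List.sorted_pairwise nums (fun x => x)
    rw [← hsdef] at this
    exact this
  rw [max_eq_last nums h, min_eq_head nums h, ← hsdef]
  rw [Bool.eq_iff_iff]
  simp only [List.all_eq_true, List.mem_range, beq_iff_eq, Bool.and_eq_true]
  rw [setLen_eq_iff_nodup]
  constructor
  · intro hc
    have hC : ∀ i, i + 1 < s.length → s.getD i 0 + 1 = s.getD (i+1) 0 := by
      intro i hi; exact hc i (by omega)
    have hap := chain_ap s hC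
    have hnds : s.Nodup := by
      rw [List.nodup_iff_injective_getElem]
      intro ⟨i, hi⟩ ⟨j, hj⟩ he
      simp only at he
      have hi' := hap i hi
      have hj' := hap j hj
      rw [List.getD_eq_getElem s 0 hi] at hi'
      rw [List.getD_eq_getElem s 0 hj] at hj'
      simp only [Fin.mk.injEq]
      omega
    refine ⟨hperm.nodup_iff.1 hnds, ?_⟩
    have hl := hap (s.length - 1) (by omega)
    have h0 := hap 0 (by omega)
    push_cast at hl h0 ⊢
    omega
  · rintro ⟨hnd, hrange⟩
    intro i hi
    have hnds : s.Nodup := hperm.nodup_iff.2 hnd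
    have gap := strict_gap s hpw hnds
    have g1 := gap i 0 (by omega)
    have g2 := gap 1 i (by omega)
    have g3 := gap (s.length - 1 - (i+1)) (i+1) (by omega)
    have e : i + 1 + (s.length - 1 - (i+1)) = s.length - 1 := by omega
    rw [e] at g3
    simp only [Nat.zero_add] at g1
    push_cast at g1 g2 g3 hrange ⊢
    omega

-- ===== VERDICT (by name: the statement is the Claim_ definition above) =====
theorem is_valid_card_set_spec : Claim_equal_is_valid_card_set := by
  intro cards _hdom _hpre
  unfold Spec_is_valid_card_set
  show is_valid_card_set cards = is_valid_card_set_alt cards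
  unfold is_valid_card_set is_valid_card_set_alt
  by_cases h3 : cards.length < 3
  · simp only [if_pos h3]
  · simp only [if_neg h3]
    have hne : cards ≠ [] := by
      intro e; subst e; simp at h3
    have hrne : cards.map pvRank ≠ [] := by simp [hne]
    -- criterion 1: len(set(ranks)) == 1  =  all ranks equal the first
    have hb1 : ((PySem.Set.ofList (cards.map pvRank)).length == 1)
        = (cards.map pvRank).all (fun r => r == (cards.map pvRank).getD 0 "") := by
      rw [Bool.eq_iff_iff]
      simp only [beq_iff_eq, List.all_eq_true]
      exact setLen_one_iff (cards.map pvRank) "" hrne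
    -- criterion 2 guard: len(set(suits)) == 1  =  no suit differs from the first
    have hb2 : ((PySem.Set.ofList (cards.map pvSuit)).length == 1)
        = !(cards.any fun c => pvSuit c != pvSuit (cards.getD 0 "")) := by
      rw [Bool.eq_iff_iff]
      simp only [beq_iff_eq, Bool.not_eq_eq_eq_not, Bool.not_true, List.any_eq_false, bne_iff_ne,
        ne_eq, not_not]
      rw [setLen_one_iff (cards.map pvSuit) ' ' (by simp [hne])]
      rcases cards with _ | ⟨c0, t⟩
      · exact absurd rfl hne
      · simp
    rw [hb1, hb2]
    cases hB1 : (cards.map pvRank).all (fun r => r == (cards.map pvRank).getD 0 "") with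
    | true => simp
    | false =>
      simp only [Bool.false_eq_true, if_false]
      cases hB2 : (cards.any fun c => pvSuit c != pvSuit (cards.getD 0 "")) with
      | true => simp
      | false =>
        simp only [Bool.not_false, if_true, Bool.false_eq_true, if_false]
        have hfuneq : (fun r => (pvRankValues.get? r).getD 0)
            = (fun r => (pvRankValuesAlt.get? r).getD 0) := by
          funext r; rw [rankValues_get?_eq]
        rw [hfuneq]
        have hnumsne : (cards.map pvRank).map (fun r => (pvRankValuesAlt.get? r).getD 0) ≠ [] := by
          simp [hne]
        have := core_consec ((cards.map pvRank).map (fun r => (pvRankValuesAlt.get? r).getD 0)) hnumsne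
        rw [← this]
        cases ((List.range ((PySem.List.sorted ((cards.map pvRank).map
            (fun r => (pvRankValuesAlt.get? r).getD 0)) (fun x => x) false).length - 1)).all
            (fun i => (PySem.List.sorted ((cards.map pvRank).map (fun r => (pvRankValuesAlt.get? r).getD 0)) (fun x => x) false).getD i 0 + 1
              == (PySem.List.sorted ((cards.map pvRank).map (fun r => (pvRankValuesAlt.get? r).getD 0)) (fun x => x) false).getD (i + 1) 0)) <;> simp
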